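-- pv_equiv track=rewrite | github.com/NErgezinger/kattis | highscore.py | highscore
-- ===== SOURCE A (Python) =====
-- def score(a, b, c):
--     if a <= b and a <= c:
--         return(a**2 + b**2 + c**2 + 7 * a)
--     if b <= c:
--         return(a**2 + b**2 + c**2 + 7 * b)
--     else:
--         return(a**2 + b**2 + c**2 + 7 * c)
--
-- memo = {}
--
-- def highscore(a, b, c, d):
--     abcd = (a,b,c,d)
--     if d == 0:
--         memo[abcd] = score(a, b, c)
--         return score(a, b, c)
--     else:
--         if abcd in memo:
--             return memo[abcd]
--         maxa = a
--         mina = a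
--         maxb = b
--         minb = b
--         maxc = c
--         minc = c
--
--         if a >= b and a >= c:
--             maxa += 1
--         elif b >= c:
--             maxb += 1
--         else:
--             maxc += 1
--
--         if a <= b and a <= c:
--             mina += 1
--         elif b <= c:
--             minb += 1
--         else:
--             minc += 1
--
--         hi = highscore(maxa, maxb, maxc, d-1)
--         lo = highscore(mina, minb, minc, d-1)
--
--         if hi > lo:
--             memo[abcd] = hi
--             return(hi)
--         else:
--             memo[abcd] = lo
--             return(lo)
-- ===== SOURCE B (Python) =====
-- def score(a, b, c):
--     if a <= b and a <= c:
--         return(a**2 + b**2 + c**2 + 7 * a)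
--     if b <= c:
--         return(a**2 + b**2 + c**2 + 7 * b)
--     else:
--         return(a**2 + b**2 + c**2 + 7 * c)
--
-- def _succs(s):
--     a, b, c = s
--     if a >= b and a >= c:
--         mx = (a + 1, b, c)
--     elif b >= c:
--         mx = (a, b + 1, c)
--     else:
--         mx = (a, b, c + 1)
--     if a <= b and a <= c:
--         mn = (a + 1, b, c)
--     elif b <= c:
--         mn = (a, b + 1, c)
--     else:
--         mn = (a, b, c + 1)
--     return mx, mn
--
-- def highscore(a, b, c, d):
--     states = {(a, b, c)}
--     for _ in range(d):
--         states = {t for s in states for t in _succs(s)}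
--     return max(score(x, y, z) for (x, y, z) in states)
-- ===== Notes on version B (the rewrite author's own statement) =====
-- stated objective: alternative
-- what changed: Replaces A's top-down binary recursion with a global memo dict by an iterative forward frontier: a set of reachable (a,b,c) states is advanced d times and the answer is the maximum score over the final set; no recursion and no memo.
import Mathlib
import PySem

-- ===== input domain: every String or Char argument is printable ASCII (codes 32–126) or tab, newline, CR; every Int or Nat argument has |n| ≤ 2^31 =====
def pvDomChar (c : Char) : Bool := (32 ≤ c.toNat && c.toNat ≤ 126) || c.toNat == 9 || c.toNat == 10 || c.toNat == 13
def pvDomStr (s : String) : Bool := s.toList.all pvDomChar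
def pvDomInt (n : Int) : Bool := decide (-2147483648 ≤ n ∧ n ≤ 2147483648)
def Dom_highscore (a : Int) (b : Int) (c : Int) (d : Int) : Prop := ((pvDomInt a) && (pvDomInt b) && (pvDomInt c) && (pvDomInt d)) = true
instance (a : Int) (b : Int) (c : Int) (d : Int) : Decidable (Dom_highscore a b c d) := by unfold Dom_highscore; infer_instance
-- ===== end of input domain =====

-- B replaces A's memoized top-down recursion by an iterative forward set of reachable states
-- (objective: alternative decomposition, not claimed faster). A also writes to a global memo
-- dict; the equivalence proved here is about the RETURN value only.

-- ===== PORT A =====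
-- score(a, b, c), shared verbatim by both Pythons
def pyScore (a b c : Int) : Int :=
  if a ≤ b ∧ a ≤ c then a ^ 2 + b ^ 2 + c ^ 2 + 7 * a
  else if b ≤ c then a ^ 2 + b ^ 2 + c ^ 2 + 7 * b
  else a ^ 2 + b ^ 2 + c ^ 2 + 7 * c

-- A's recursion on d, written on Nat fuel (Python recurses until d == 0; d < 0 raises and is
-- outside Pre_). The global memo dict is threaded through the recursion as state; each top-level
-- call starts it empty (Python keeps it across calls, which never changes the returned value).
def hsA : Int → Int → Int → Nat → Std.HashMap (Int × Int × Int × Int) Int →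
    Int × Std.HashMap (Int × Int × Int × Int) Int
  | a, b, c, 0, memo => (pyScore a b c, memo.insert (a, b, c, 0) (pyScore a b c))
  | a, b, c, n + 1, memo =>
    match memo[((a, b, c, (n : Int) + 1))]? with
    | some v => (v, memo)
    | none =>
      let mx : Int × Int × Int :=
        if a ≥ b ∧ a ≥ c then (a + 1, b, c)
        else if b ≥ c then (a, b + 1, c)
        else (a, b, c + 1)
      let mn : Int × Int × Int :=
        if a ≤ b ∧ a ≤ c then (a + 1, b, c)
        else if b ≤ c then (a, b + 1, c)
        else (a, b, c + 1)
      let r1 := hsA mx.1 mx.2.1 mx.2.2 n memo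
      let r2 := hsA mn.1 mn.2.1 mn.2.2 n r1.2
      if r1.1 > r2.1 then (r1.1, r2.2.insert (a, b, c, (n : Int) + 1) r1.1)
      else (r2.1, r2.2.insert (a, b, c, (n : Int) + 1) r2.1)

def highscore (a : Int) (b : Int) (c : Int) (d : Int) : Int :=
  (hsA a b c d.toNat ∅).1

-- ===== PORT B =====
-- _succs(s): the (max-incremented, min-incremented) successor pair of a state
def succs (s : Int × Int × Int) : (Int × Int × Int) × (Int × Int × Int) :=
  let mx : Int × Int × Int :=
    if s.1 ≥ s.2.1 ∧ s.1 ≥ s.2.2 then (s.1 + 1, s.2.1, s.2.2)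
    else if s.2.1 ≥ s.2.2 then (s.1, s.2.1 + 1, s.2.2)
    else (s.1, s.2.1, s.2.2 + 1)
  let mn : Int × Int × Int :=
    if s.1 ≤ s.2.1 ∧ s.1 ≤ s.2.2 then (s.1 + 1, s.2.1, s.2.2)
    else if s.2.1 ≤ s.2.2 then (s.1, s.2.1 + 1, s.2.2)
    else (s.1, s.2.1, s.2.2 + 1)
  (mx, mn)

-- the set comprehension {t for s in states for t in _succs(s)}
def stepStates (S : PySem.Set (Int × Int × Int)) : PySem.Set (Int × Int × Int) :=
  S.foldl (fun acc s => PySem.Set.add (PySem.Set.add acc (succs s).1) (succs s).2)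
    PySem.Set.empty

def highscore_alt (a : Int) (b : Int) (c : Int) (d : Int) : Int :=
  let states :=
    (PySem.List.pyRange 0 d 1).foldl (fun S _ => stepStates S)
      (PySem.Set.ofList [(a, b, c)])
  -- max(...) over a generator that is never empty (states always has a member), so getD 0 is exact
  (PySem.List.max? (states.map (fun s => pyScore s.1 s.2.1 s.2.2)) (fun x => x)).getD 0

-- ===== PRECONDITION & SPEC =====
-- Pre_ excludes d < 0, where Python A recurses with d never reaching 0 and raises RecursionError.
def Pre_highscore (a : Int) (b : Int) (c : Int) (d : Int) : Prop := 0 ≤ d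
instance (a : Int) (b : Int) (c : Int) (d : Int) : Decidable (Pre_highscore a b c d) := by unfold Pre_highscore; infer_instance
def pvWitness_highscore : Int × Int × Int × Int := (1, 2, 3, 3)

def Spec_highscore (a : Int) (b : Int) (c : Int) (d : Int) (out : Int) : Prop := out = highscore_alt a b c d
instance (a : Int) (b : Int) (c : Int) (d : Int) (out : Int) : Decidable (Spec_highscore a b c d out) := by unfold Spec_highscore; infer_instance

-- ===== CLAIM (what is proved, stated in full; the proofs are below) =====
def Claim_equal_highscore : Prop := ∀ (a : Int) (b : Int) (c : Int) (d : Int), Dom_highscore a b c d → Pre_highscore a b c d → Spec_highscore a b c d (highscore a b c d)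
-- ===== LEMMAS AND PROOFS =====

theorem ite_gt_max (x y : Int) : (if x > y then x else y) = max x y := by
  rw [max_def]; split_ifs <;> omega

-- the memo-free value of A's recursion (proved below to be what hsA returns under a sound memo)
def hsP : Int → Int → Int → Nat → Int
  | a, b, c, 0 => pyScore a b c
  | a, b, c, n + 1 =>
    let mx : Int × Int × Int :=
      if a ≥ b ∧ a ≥ c then (a + 1, b, c)
      else if b ≥ c then (a, b + 1, c)
      else (a, b, c + 1)
    let mn : Int × Int × Int :=
      if a ≤ b ∧ a ≤ c then (a + 1, b, c)
      else if b ≤ c then (a, b + 1, c)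
      else (a, b, c + 1)
    let hi := hsP mx.1 mx.2.1 mx.2.2 n
    let lo := hsP mn.1 mn.2.1 mn.2.2 n
    if hi > lo then hi else lo

-- score / the memo-free recursion on a packed state
def scoreT (s : Int × Int × Int) : Int := pyScore s.1 s.2.1 s.2.2
def hsT (s : Int × Int × Int) (n : Nat) : Int := hsP s.1 s.2.1 s.2.2 n

theorem hsT_succ (s : Int × Int × Int) (n : Nat) :
    hsT s (n + 1) = max (hsT (succs s).1 n) (hsT (succs s).2 n) := by
  obtain ⟨a, b, c⟩ := s
  simp only [hsT, hsP, succs]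
  exact ite_gt_max _ _

-- a sound memo: every stored entry is the memo-free value of its key
def MemoInv (memo : Std.HashMap (Int × Int × Int × Int) Int) : Prop :=
  ∀ (a b c : Int) (n : Nat) (v : Int),
    memo[((a, b, c, (n : Int)))]? = some v → v = hsP a b c n

theorem memoInv_insert {memo : Std.HashMap (Int × Int × Int × Int) Int}
    (h : MemoInv memo) (a b c : Int) (m : Nat) :
    MemoInv (memo.insert (a, b, c, (m : Int)) (hsP a b c m)) := by
  intro a' b' c' n v hv
  rw [Std.HashMap.getElem?_insert] at hv
  split at hv
  · rename_i heq
    rw [beq_iff_eq] at heq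
    replace heq := heq.symm
    rw [Prod.mk.injEq] at heq; obtain ⟨rfl, heq⟩ := heq
    rw [Prod.mk.injEq] at heq; obtain ⟨rfl, heq⟩ := heq
    rw [Prod.mk.injEq] at heq; obtain ⟨rfl, hn⟩ := heq
    have hnm : n = m := by exact_mod_cast hn
    subst hnm
    exact (Option.some_inj.mp hv).symm
  · exact h a' b' c' n v hv

theorem hsA_step (a b c : Int) (n : Nat)
    (memo : Std.HashMap (Int × Int × Int × Int) Int)
    (hg : memo[((a, b, c, (n : Int) + 1))]? = none) :
    hsA a b c (n + 1) memo =
      (let p := succs (a, b, c)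
       let r1 := hsA p.1.1 p.1.2.1 p.1.2.2 n memo
       let r2 := hsA p.2.1 p.2.2.1 p.2.2.2 n r1.2
       if r1.1 > r2.1 then (r1.1, r2.2.insert (a, b, c, (n : Int) + 1) r1.1)
       else (r2.1, r2.2.insert (a, b, c, (n : Int) + 1) r2.1)) := by
  simp only [hsA, hg, succs]

theorem hsA_correct (n : Nat) (a b c : Int)
    (memo : Std.HashMap (Int × Int × Int × Int) Int) (h : MemoInv memo) :
    (hsA a b c n memo).1 = hsP a b c n ∧ MemoInv (hsA a b c n memo).2 := by
  induction n generalizing a b c memo with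
  | zero =>
    refine ⟨rfl, ?_⟩
    have hins := memoInv_insert h a b c 0
    simpa [hsP] using hins
  | succ n ih =>
    cases hg : memo[((a, b, c, (n : Int) + 1))]? with
    | some v =>
      have hv : v = hsP a b c (n + 1) := by
        have hkey := h a b c (n + 1) v
        push_cast at hkey
        exact hkey hg
      constructor
      · simp only [hsA, hg]; exact hv
      · simp only [hsA, hg]; exact h
    | none =>
      rw [hsA_step a b c n memo hg]
      obtain ⟨h1, hm1⟩ :=
        ih (succs (a, b, c)).1.1 (succs (a, b, c)).1.2.1 (succs (a, b, c)).1.2.2 memo h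
      obtain ⟨h2, hm2⟩ :=
        ih (succs (a, b, c)).2.1 (succs (a, b, c)).2.2.1 (succs (a, b, c)).2.2.2 _ hm1
      have hmax : hsP a b c (n + 1) = max (hsT (succs (a, b, c)).1 n) (hsT (succs (a, b, c)).2 n) :=
        hsT_succ (a, b, c) n
      have h1' : (hsA (succs (a, b, c)).1.1 (succs (a, b, c)).1.2.1 (succs (a, b, c)).1.2.2 n memo).1
          = hsT (succs (a, b, c)).1 n := h1
      have h2' : (hsA (succs (a, b, c)).2.1 (succs (a, b, c)).2.2.1 (succs (a, b, c)).2.2.2 n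
          (hsA (succs (a, b, c)).1.1 (succs (a, b, c)).1.2.1 (succs (a, b, c)).1.2.2 n memo).2).1
          = hsT (succs (a, b, c)).2 n := h2
      simp only
      constructor
      · split <;> rename_i hc <;> rw [h1', h2'] at hc <;> rw [hmax]
        · simp only; rw [h1']
          omega
        · simp only; rw [h2']
          omega
      · have hins := memoInv_insert hm2 a b c (n + 1)
        push_cast at hins
        rw [hmax] at hins
        split <;> rename_i hc <;> rw [h1', h2'] at hc <;> simp only
        · have hv : max (hsT (succs (a, b, c)).1 n) (hsT (succs (a, b, c)).2 n)
              = (hsA (succs (a, b, c)).1.1 (succs (a, b, c)).1.2.1 (succs (a, b, c)).1.2.2 n memo).1 := by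
            rw [h1']; omega
          rw [hv] at hins
          exact hins
        · have hv : max (hsT (succs (a, b, c)).1 n) (hsT (succs (a, b, c)).2 n)
              = (hsA (succs (a, b, c)).2.1 (succs (a, b, c)).2.2.1 (succs (a, b, c)).2.2.2 n
                  (hsA (succs (a, b, c)).1.1 (succs (a, b, c)).1.2.1 (succs (a, b, c)).1.2.2 n memo).2).1 := by
            rw [h2']; omega
          rw [hv] at hins
          exact hins

theorem highscore_eq_hsP (a b c d : Int) : highscore a b c d = hsP a b c d.toNat := by
  unfold highscore
  exact (hsA_correct d.toNat a b c ∅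
    (by intro _ _ _ _ _ hx; rw [Std.HashMap.getElem?_empty] at hx; cases hx)).1

-- the states reachable from s in exactly n moves of A's two successors
def Reach : Nat → (Int × Int × Int) → (Int × Int × Int) → Prop
  | 0, s, t => t = s
  | n + 1, s, t => Reach n (succs s).1 t ∨ Reach n (succs s).2 t

-- the memo-free recursion computes the maximum score over all states reachable in n moves
theorem hsT_isMax (n : Nat) (s : Int × Int × Int) :
    (∃ t, Reach n s t ∧ scoreT t = hsT s n) ∧ (∀ t, Reach n s t → scoreT t ≤ hsT s n) := by
  induction n generalizing s with
  | zero =>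
    refine ⟨⟨s, rfl, rfl⟩, ?_⟩
    rintro t rfl; exact le_refl _
  | succ n ih =>
    rw [hsT_succ]
    obtain ⟨⟨t1, ht1, he1⟩, hb1⟩ := ih (succs s).1
    obtain ⟨⟨t2, ht2, he2⟩, hb2⟩ := ih (succs s).2
    constructor
    · rcases le_total (hsT (succs s).1 n) (hsT (succs s).2 n) with h | h
      · exact ⟨t2, Or.inr ht2, by rw [he2]; omega⟩
      · exact ⟨t1, Or.inl ht1, by rw [he1]; omega⟩
    · rintro t (ht | ht)
      · exact le_trans (hb1 t ht) (le_max_left _ _)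
      · exact le_trans (hb2 t ht) (le_max_right _ _)

theorem mem_stepStates_foldl (L : List (Int × Int × Int)) (acc : PySem.Set (Int × Int × Int))
    (x : Int × Int × Int) :
    x ∈ L.foldl (fun acc s => PySem.Set.add (PySem.Set.add acc (succs s).1) (succs s).2) acc ↔
      x ∈ acc ∨ ∃ s ∈ L, x = (succs s).1 ∨ x = (succs s).2 := by
  induction L generalizing acc with
  | nil => simp
  | cons h t ih =>
    simp only [List.foldl_cons, ih, PySem.Set.mem_add, List.mem_cons]
    constructor
    · rintro (((hx | hx) | hx) | ⟨s, hs, hx⟩)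
      · exact Or.inl hx
      · exact Or.inr ⟨h, Or.inl rfl, Or.inl hx⟩
      · exact Or.inr ⟨h, Or.inl rfl, Or.inr hx⟩
      · exact Or.inr ⟨s, Or.inr hs, hx⟩
    · rintro (hx | ⟨s, (rfl | hs), hx⟩)
      · exact Or.inl (Or.inl (Or.inl hx))
      · rcases hx with hx | hx
        · exact Or.inl (Or.inl (Or.inr hx))
        · exact Or.inl (Or.inr hx)
      · exact Or.inr ⟨s, hs, hx⟩

theorem mem_stepStates (S : PySem.Set (Int × Int × Int)) (x : Int × Int × Int) :
    x ∈ stepStates S ↔ ∃ s ∈ S, x = (succs s).1 ∨ x = (succs s).2 := by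
  unfold stepStates
  rw [mem_stepStates_foldl]
  simp [PySem.Set.empty]

theorem mem_iter (L : List Int) (S : PySem.Set (Int × Int × Int)) (x : Int × Int × Int) :
    x ∈ L.foldl (fun S _ => stepStates S) S ↔ ∃ s ∈ S, Reach L.length s x := by
  induction L generalizing S with
  | nil => simp [Reach]
  | cons h t ih =>
    simp only [List.foldl_cons, ih, List.length_cons]
    constructor
    · rintro ⟨u, hu, hr⟩
      rw [mem_stepStates] at hu
      obtain ⟨s, hs, hu⟩ := hu
      refine ⟨s, hs, ?_⟩
      show Reach (t.length + 1) s x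
      rcases hu with rfl | rfl
      · exact Or.inl hr
      · exact Or.inr hr
    · rintro ⟨s, hs, hr⟩
      rcases hr with hr | hr
      · exact ⟨(succs s).1, (mem_stepStates _ _).2 ⟨s, hs, Or.inl rfl⟩, hr⟩
      · exact ⟨(succs s).2, (mem_stepStates _ _).2 ⟨s, hs, Or.inr rfl⟩, hr⟩

theorem highscore_alt_eq_hsT (a b c d : Int) :
    highscore_alt a b c d = hsT (a, b, c) d.toNat := by
  unfold highscore_alt
  set N := d.toNat with hN
  have hlen : (PySem.List.pyRange 0 d 1).length = N := by
    rw [PySem.List.length_pyRange_one]; omega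
  set states := (PySem.List.pyRange 0 d 1).foldl (fun S _ => stepStates S)
      (PySem.Set.ofList [(a, b, c)]) with hstates
  have hmem : ∀ x, x ∈ states ↔ Reach N (a, b, c) x := by
    intro x
    rw [hstates, mem_iter, hlen]
    constructor
    · rintro ⟨s, hs, hr⟩
      simp only [PySem.Set.mem_ofList, List.mem_singleton] at hs
      exact hs ▸ hr
    · intro hr
      exact ⟨(a, b, c), by simp [PySem.Set.mem_ofList], hr⟩
  obtain ⟨⟨t, htr, hte⟩, hbound⟩ := hsT_isMax N (a, b, c)
  have htmem : t ∈ states := (hmem t).2 htr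
  have hne : states.map (fun s => pyScore s.1 s.2.1 s.2.2) ≠ [] := by
    intro h
    rw [List.map_eq_nil_iff] at h
    rw [h] at htmem
    exact absurd htmem (List.not_mem_nil)
  have hnn : PySem.List.max? (states.map (fun s => pyScore s.1 s.2.1 s.2.2)) (fun x => x) ≠ none :=
    fun h => hne ((PySem.List.max?_eq_none_iff _ _).1 h)
  obtain ⟨m, hm⟩ := Option.ne_none_iff_exists'.1 hnn
  show (PySem.List.max? (states.map (fun s => pyScore s.1 s.2.1 s.2.2)) (fun x => x)).getD 0 =
    hsT (a, b, c) N
  rw [hm, Option.getD_some]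
  have hmMem := PySem.List.max?_mem hm
  have hmMax := PySem.List.max?_isMax hm
  obtain ⟨u, humem, hue⟩ := List.mem_map.1 hmMem
  have h1 : m ≤ hsT (a, b, c) N := by
    rw [← hue]
    exact hbound u ((hmem u).1 humem)
  have h2 : hsT (a, b, c) N ≤ m := by
    rw [← hte]
    exact hmMax _ (List.mem_map.2 ⟨t, htmem, rfl⟩)
  omega

-- ===== VERDICT (by name: the statement is the Claim_ definition above) =====
theorem highscore_spec : Claim_equal_highscore := by
  intro a b c d _ _
  show highscore a b c d = highscore_alt a b c d
  rw [highscore_alt_eq_hsT, highscore_eq_hsP]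
  rfl
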